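-- pv_equiv track=rewrite | github.com/Chaobs/ariadne-memory | tools/msgfmt.py | _read_po_string
-- ===== SOURCE A (Python) =====
-- def _unescape(s: str) -> str:
--     """Unescape a PO string literal."""
--     i = 0
--     result = []
--     while i < len(s):
--         if i < len(s) - 1 and s[i] == "\\":
--             c = s[i + 1]
--             if c == "n":    result.append("\n")
--             elif c == "t":  result.append("\t")
--             elif c == "r":  result.append("\r")
--             elif c == "\\": result.append("\\")
--             elif c == '"':  result.append('"')
--             elif c == "\n": result.append("")
--             else:           result.append(c)
--             i += 2
--         else:
--             result.append(s[i])
--             i += 1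
--     return "".join(result)
--
-- def _read_po_string(lines: list[str], start: int) -> tuple[str, int]:
--     """Parse a PO string value from lines[start:] (caller strips keyword)."""
--     first = lines[start].strip().strip('"')
--     value = _unescape(first)
--     i = start + 1
--     while i < len(lines) and lines[i].strip().startswith('"'):
--         cont = lines[i].strip().strip('"')
--         value += _unescape(cont)
--         i += 1
--     return value, i
-- ===== SOURCE B (Python) =====
-- # B: _unescape rewritten as split-on-backslash + table lookup (one library split
-- # instead of an index-walking char loop); outer line loop kept.
-- _TABLE = {'n': '\n', 't': '\t', 'r': '\r', '\n': ''}
--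
-- def _unescape(s: str) -> str:
--     parts = s.split('\\')
--     out = [parts[0]]
--     skip = False
--     for p in parts[1:]:
--         if skip:
--             out.append(p)
--             skip = False
--         elif p == '':
--             out.append('\\')
--             skip = True
--         else:
--             out.append(_TABLE.get(p[0], p[0]) + p[1:])
--     return ''.join(out)
--
-- def _read_po_string(lines: list[str], start: int) -> tuple[str, int]:
--     value = _unescape(lines[start].strip().strip('"'))
--     i = start + 1
--     while i < len(lines) and lines[i].strip().startswith('"'):
--         value += _unescape(lines[i].strip().strip('"'))
--         i += 1
--     return value, i
-- ===== Notes on version B (the rewrite author's own statement) =====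
-- stated objective: idiomatic
-- what changed: _unescape is rewritten from an index-walking character loop into a single s.split('\\') followed by a table-driven (dict.get) rejoin of the pieces with a skip flag for escaped backslashes; the outer line loop is unchanged.
import Mathlib
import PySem

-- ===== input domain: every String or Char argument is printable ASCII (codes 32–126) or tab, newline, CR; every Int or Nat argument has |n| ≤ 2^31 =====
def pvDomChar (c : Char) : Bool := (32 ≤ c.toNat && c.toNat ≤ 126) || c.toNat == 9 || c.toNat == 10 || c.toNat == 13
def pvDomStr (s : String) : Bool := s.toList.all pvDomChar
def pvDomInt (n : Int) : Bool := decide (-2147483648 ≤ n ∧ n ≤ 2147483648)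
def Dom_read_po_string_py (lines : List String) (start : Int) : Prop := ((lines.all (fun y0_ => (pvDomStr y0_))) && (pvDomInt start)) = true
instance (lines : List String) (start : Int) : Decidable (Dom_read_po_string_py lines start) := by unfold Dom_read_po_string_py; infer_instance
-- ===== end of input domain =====

-- B replaces A's index-walking _unescape char loop with a split-on-backslash pass
-- plus a table lookup (objective: idiomatic); outer line loop unchanged.


-- ===== PORT A =====
-- _unescape: the while loop advances i by 2 on a backslash with a following char,
-- else by 1; here as structural recursion over the char list, join = String.ofList.
def pvUnescA : List Char → List Char
  | '\\' :: c :: rest =>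
      (if c = 'n' then ['\n']
       else if c = 't' then ['\t']
       else if c = 'r' then ['\r']
       else if c = '\\' then ['\\']
       else if c = '"' then ['"']
       else if c = '\n' then []
       else [c]) ++ pvUnescA rest
  | c :: rest => c :: pvUnescA rest
  | [] => []

-- the while loop of _read_po_string (i counts up to len(lines); lines[i] is in
-- range whenever the guard holds and i > -len, so pyGetD is exact here)
def pvLoopA (lines : List String) (i : Int) (value : String) : String × Int :=
  if _h : i < (lines.length : Int) ∧
      PySem.Str.startswith (PySem.Str.strip (PySem.List.pyGetD lines i "")) "\"" then
    pvLoopA lines (i + 1)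
      (value ++ String.ofList (pvUnescA
        (PySem.Str.stripChars (PySem.Str.strip (PySem.List.pyGetD lines i "")) "\"").toList))
  else (value, i)
termination_by ((lines.length : Int) - i).toNat
decreasing_by omega

def read_po_string_py (lines : List String) (start : Int) : String × Int :=
  match PySem.List.pyGet? lines start with
  | none => ("", 0)   -- IndexError: outside Pre_
  | some l0 =>
    let first := PySem.Str.stripChars (PySem.Str.strip l0) "\""
    pvLoopA lines (start + 1) (String.ofList (pvUnescA first.toList))

-- ===== PORT B =====
def pvTable : PySem.Dict Char (List Char) :=
  PySem.Dict.ofList [('n', ['\n']), ('t', ['\t']), ('r', ['\r']), ('\n', [])]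

-- the for-loop over parts[1:] with its skip flag
def pvProcB : Bool → List (List Char) → List Char
  | _, [] => []
  | true, p :: rest => p ++ pvProcB false rest
  | false, [] :: rest => '\\' :: pvProcB true rest
  | false, (c :: cs) :: rest => PySem.Dict.getD pvTable c [c] ++ cs ++ pvProcB false rest

def pvUnescB (cs : List Char) : List Char :=
  match PySem.Chars.splitOn cs ['\\'] with
  | [] => []                       -- split never returns []
  | p0 :: rest => p0 ++ pvProcB false rest

def pvLoopB (lines : List String) (i : Int) (value : String) : String × Int :=
  if _h : i < (lines.length : Int) ∧
      PySem.Str.startswith (PySem.Str.strip (PySem.List.pyGetD lines i "")) "\"" then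
    pvLoopB lines (i + 1)
      (value ++ String.ofList (pvUnescB
        (PySem.Str.stripChars (PySem.Str.strip (PySem.List.pyGetD lines i "")) "\"").toList))
  else (value, i)
termination_by ((lines.length : Int) - i).toNat
decreasing_by omega

def read_po_string_py_alt (lines : List String) (start : Int) : String × Int :=
  match PySem.List.pyGet? lines start with
  | none => ("", 0)   -- IndexError: outside Pre_
  | some l0 =>
    let first := PySem.Str.stripChars (PySem.Str.strip l0) "\""
    pvLoopB lines (start + 1) (String.ofList (pvUnescB first.toList))

-- ===== PRECONDITION & SPEC =====
-- A raises IndexError iff lines[start] is out of range; Pre_ excludes exactly that.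
def Pre_read_po_string_py (lines : List String) (start : Int) : Prop :=
  PySem.Raise.InRange lines.length start
instance (lines : List String) (start : Int) : Decidable (Pre_read_po_string_py lines start) := by
  unfold Pre_read_po_string_py; infer_instance

def pvWitness_read_po_string_py : List String × Int := (["msgid \"a\"", "\"b\\n\""], 1)

def Spec_read_po_string_py (lines : List String) (start : Int) (out : String × Int) : Prop := out = read_po_string_py_alt lines start
instance (lines : List String) (start : Int) (out : String × Int) : Decidable (Spec_read_po_string_py lines start out) := by unfold Spec_read_po_string_py; infer_instance

-- ===== CLAIM (what is proved, stated in full; the proofs are below) =====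
def Claim_equal_read_po_string_py : Prop := ∀ (lines : List String) (start : Int), Dom_read_po_string_py lines start → Pre_read_po_string_py lines start → Spec_read_po_string_py lines start (read_po_string_py lines start)

-- ===== LEMMAS AND PROOFS =====

-- the recursive characterisation of splitOn on separator ['\\']
def pvSplit : List Char → List (List Char)
  | [] => [[]]
  | c :: rest =>
    if c = '\\' then [] :: pvSplit rest
    else match pvSplit rest with
      | [] => [[c]]
      | q :: t => (c :: q) :: t

theorem pvSplit_ne_nil (l : List Char) : pvSplit l ≠ [] := by
  cases l with
  | nil => simp [pvSplit]
  | cons c rest =>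
    simp only [pvSplit]
    split
    · simp
    · split <;> simp_all

theorem pvSplitOn_go_eq (fuel : Nat) (l cur : List Char) (acc : List (List Char))
    (h : l.length < fuel) :
    PySem.Chars.splitOn.go ['\\'] fuel l cur acc =
      acc.reverse ++ (match pvSplit l with
        | [] => []
        | q :: t => (cur.reverse ++ q) :: t) := by
  induction fuel generalizing l cur acc with
  | zero => omega
  | succ f ih =>
    cases l with
    | nil =>
      simp [PySem.Chars.splitOn.go, pvSplit]
    | cons c rest =>
      rw [PySem.Chars.splitOn.go]
      simp only [List.length_cons] at h
      by_cases hc : c = '\\'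
      · subst hc
        rw [if_pos (by simp [List.isPrefixOf])]
        have hdrop : List.drop ['\\'].length ('\\' :: rest) = rest := rfl
        rw [hdrop, ih rest [] (List.reverse cur :: acc) (by omega)]
        have hne := pvSplit_ne_nil rest
        cases hsp : pvSplit rest with
        | nil => exact absurd hsp hne
        | cons q t => simp [pvSplit, hsp]
      · rw [if_neg (by simp [List.isPrefixOf]; exact fun hh => hc hh.symm)]
        rw [ih rest (c :: cur) acc (by omega)]
        have hne := pvSplit_ne_nil rest
        cases hsp : pvSplit rest with
        | nil => exact absurd hsp hne
        | cons q t => simp [pvSplit, hsp, hc]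

theorem pvSplitOn_eq (l : List Char) :
    PySem.Chars.splitOn l ['\\'] = pvSplit l := by
  rw [PySem.Chars.splitOn, pvSplitOn_go_eq (l.length + 1) l [] [] (by omega)]
  have hne := pvSplit_ne_nil l
  cases hsp : pvSplit l with
  | nil => exact absurd hsp hne
  | cons q t => simp

theorem pvTable_getD (c : Char) :
    PySem.Dict.getD pvTable c [c] =
      (if c = 'n' then ['\n'] else if c = 't' then ['\t'] else if c = 'r' then ['\r']
       else if c = '\n' then [] else [c]) := by
  have hmk : pvTable = PySem.Dict.mk [('n', ['\n']), ('t', ['\t']), ('r', ['\r']), ('\n', [])] := by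
    decide
  rw [hmk]
  by_cases h1 : c = 'n'
  · subst h1; decide
  by_cases h2 : c = 't'
  · subst h2; decide
  by_cases h3 : c = 'r'
  · subst h3; decide
  by_cases h5 : c = '\n'
  · subst h5; decide
  have b1 : ('n' == c) = false := beq_eq_false_iff_ne.mpr (Ne.symm h1)
  have b2 : ('t' == c) = false := beq_eq_false_iff_ne.mpr (Ne.symm h2)
  have b3 : ('r' == c) = false := beq_eq_false_iff_ne.mpr (Ne.symm h3)
  have b5 : ('\n' == c) = false := beq_eq_false_iff_ne.mpr (Ne.symm h5)
  simp [PySem.Dict.getD, PySem.Dict.get?, List.find?, b1, b2, b3, b5, h1, h2, h3, h5]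

-- core: A's char-walking unescape equals B's split-then-rejoin unescape
theorem pvUnesc_eq (cs : List Char) : pvUnescA cs = pvUnescB cs := by
  induction cs using pvUnescA.induct with
  | case1 c rest ih =>
    -- cs = '\\' :: c :: rest
    rw [pvUnescB, pvSplitOn_eq]
    have h0 : pvSplit ('\\' :: c :: rest) = [] :: pvSplit (c :: rest) := by
      simp [pvSplit]
    rw [h0]
    by_cases hc : c = '\\'
    · subst hc
      have h1 : pvSplit ('\\' :: rest) = [] :: pvSplit rest := by simp [pvSplit]
      rw [h1]
      have hne := pvSplit_ne_nil rest
      cases hsp : pvSplit rest with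
      | nil => exact absurd hsp hne
      | cons q t =>
        simp only [List.nil_append, pvProcB]
        rw [show pvUnescA ('\\' :: '\\' :: rest) = ['\\'] ++ pvUnescA rest from by
          simp [pvUnescA]]
        rw [ih, pvUnescB, pvSplitOn_eq, hsp]
        simp
    · have h1 : pvSplit (c :: rest) =
          match pvSplit rest with
          | [] => [[c]]
          | q :: t => (c :: q) :: t := by
        simp [pvSplit, hc]
      have hne := pvSplit_ne_nil rest
      cases hsp : pvSplit rest with
      | nil => exact absurd hsp hne
      | cons q t =>
        rw [hsp] at h1
        rw [h1]
        simp only [List.nil_append, pvProcB]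
        rw [show pvUnescA ('\\' :: c :: rest) =
            (if c = 'n' then ['\n'] else if c = 't' then ['\t'] else if c = 'r' then ['\r']
             else if c = '\\' then ['\\'] else if c = '"' then ['"'] else if c = '\n' then []
             else [c]) ++ pvUnescA rest from by simp [pvUnescA]]
        rw [ih, pvUnescB, pvSplitOn_eq, hsp, pvTable_getD]
        by_cases hq : c = '"' <;> simp [hc, hq]
  | case2 c rest h1 ih =>
    -- cs = c :: rest, not a backslash followed by a char
    rw [pvUnescB, pvSplitOn_eq]
    rw [show pvUnescA (c :: rest) = c :: pvUnescA rest from by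
      rcases rest with _ | ⟨c2, rest2⟩
      · simp [pvUnescA]
      · have hc : c ≠ '\\' := fun hcc => h1 c2 rest2 hcc rfl
        simp [pvUnescA]]
    rcases rest with _ | ⟨c2, rest2⟩
    · by_cases hc : c = '\\' <;> simp [pvSplit, hc, pvProcB, pvUnescA]
    · have hc : c ≠ '\\' := fun hcc => h1 c2 rest2 hcc rfl
      have hne := pvSplit_ne_nil (c2 :: rest2)
      cases hsp : pvSplit (c2 :: rest2) with
      | nil => exact absurd hsp hne
      | cons q t =>
        rw [show pvSplit (c :: c2 :: rest2) = (c :: q) :: t from by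
          rw [pvSplit, if_neg hc, hsp]]
        rw [ih, pvUnescB, pvSplitOn_eq, hsp]
        simp
  | case3 => simp [pvUnescA, pvUnescB, pvSplitOn_eq, pvSplit, pvProcB]

theorem pvLoop_eq (lines : List String) (i : Int) (value : String) :
    pvLoopA lines i value = pvLoopB lines i value := by
  induction i, value using pvLoopA.induct lines with
  | case1 i value h ih =>
    rw [pvUnesc_eq] at ih
    rw [pvLoopA, pvLoopB, dif_pos h, dif_pos h, pvUnesc_eq]
    exact ih
  | case2 i value h =>
    rw [pvLoopA, pvLoopB, dif_neg h, dif_neg h]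

-- ===== VERDICT (by name: the statement is the Claim_ definition above) =====
theorem read_po_string_py_spec : Claim_equal_read_po_string_py := by
  intro lines start _ _
  unfold Spec_read_po_string_py read_po_string_py read_po_string_py_alt
  cases hg : PySem.List.pyGet? lines start with
  | none => rfl
  | some l0 => simp only [pvUnesc_eq, pvLoop_eq]
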